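-- pv_equiv track=rewrite | github.com/michaelbuzzetta/CS115 | Homeworks/hw4.py | nextItem
-- ===== SOURCE A (Python) =====
-- def nextItem(i):
--     if len(i)==1:
--         return []
--     else:
--         if len(i)==0:
--             return 0
--         else:
--             newList = [i[0]+i[1]]+nextItem(i[1:])
--             return newList
-- ===== SOURCE B (Python) =====
-- def nextItem(i):
--     result = []
--     k = 0
--     while k < len(i) - 1:
--         result.append(i[k] + i[k + 1])
--         k += 1
--     return result
-- ===== Notes on version B (the rewrite author's own statement) =====
-- stated objective: faster
-- what changed: Replaces A's head recursion over i[1:] (quadratic list copying) with a single index loop appending i[k]+i[k+1] to an accumulator list; B needs no special cases for length 0 or 1.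
-- outside the precondition, e.g. on nextItem([]): A returns 0, B returns []
import Mathlib
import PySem

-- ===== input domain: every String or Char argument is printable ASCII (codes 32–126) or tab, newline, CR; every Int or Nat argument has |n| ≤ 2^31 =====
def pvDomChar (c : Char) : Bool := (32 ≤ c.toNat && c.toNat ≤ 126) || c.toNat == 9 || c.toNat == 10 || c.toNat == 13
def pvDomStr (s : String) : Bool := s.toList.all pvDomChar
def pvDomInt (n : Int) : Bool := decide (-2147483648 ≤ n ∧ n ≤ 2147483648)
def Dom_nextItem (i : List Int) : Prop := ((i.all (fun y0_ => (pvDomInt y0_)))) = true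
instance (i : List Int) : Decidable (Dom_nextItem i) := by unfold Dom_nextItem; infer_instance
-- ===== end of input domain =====

-- B replaces A's head recursion over i[1:] with an index loop and accumulator; simpler, no length special cases.


-- ===== PORT A =====
-- A: if len==1 return []; if len==0 return 0 (excluded by Pre_, see below); else [i[0]+i[1]] ++ nextItem(i[1:])
def nextItem (i : List Int) : List Int :=
  match i with
  | [_] => []
  | [] => []          -- Python A returns the int 0 here (not a list); this input is outside Pre_nextItem
  | a :: b :: t => (a + b) :: nextItem (b :: t)

-- ===== PORT B =====
-- B: result = []; while k < len(i)-1: result.append(i[k]+i[k+1]); indices are always in range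
def nextItem_alt (i : List Int) : List Int :=
  (PySem.List.pyRange 0 ((i.length : Int) - 1) 1).foldl
    (fun result k => result ++ [PySem.List.pyGetD i k 0 + PySem.List.pyGetD i (k + 1) 0]) []

-- ===== PRECONDITION & SPEC =====
-- Pre_ excludes only the empty list, on which A returns the int 0, not a value of the declared list type.
def Pre_nextItem (i : List Int) : Prop := i ≠ []
instance (i : List Int) : Decidable (Pre_nextItem i) := by unfold Pre_nextItem; infer_instance
def pvWitness_nextItem : List Int := [1, 2, 3]
def Spec_nextItem (i : List Int) (out : List Int) : Prop := out = nextItem_alt i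
instance (i : List Int) (out : List Int) : Decidable (Spec_nextItem i out) := by unfold Spec_nextItem; infer_instance

-- ===== CLAIM (what is proved, stated in full; the proofs are below) =====
def Claim_equal_nextItem : Prop := ∀ (i : List Int), Dom_nextItem i → Pre_nextItem i → Spec_nextItem i (nextItem i)

-- ===== LEMMAS AND PROOFS =====

-- B's loop as a map over natural indices
theorem nextItem_alt_eq_map (i : List Int) :
    nextItem_alt i =
      (List.range (i.length - 1)).map (fun k => i.getD k 0 + i.getD (k + 1) 0) := by
  unfold nextItem_alt
  rw [PySem.List.foldl_append_singleton_eq_map, PySem.List.pyRange_one]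
  have h : (((i.length : Int) - 1) - 0).toNat = i.length - 1 := by omega
  rw [h, List.map_map]
  refine List.map_congr_left (fun k _ => ?_)
  simp only [Function.comp_apply, zero_add]
  have h2 : ((k : Int) + 1) = ((k + 1 : Nat) : Int) := by push_cast; ring
  rw [h2, PySem.List.pyGetD_natCast, PySem.List.pyGetD_natCast]

theorem map_adj_eq_nextItem : ∀ (i : List Int),
    (List.range (i.length - 1)).map (fun k => i.getD k 0 + i.getD (k + 1) 0) = nextItem i
  | [] => rfl
  | [_] => rfl
  | a :: b :: t => by
    have ih := map_adj_eq_nextItem (b :: t)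
    simp only [List.length_cons, Nat.add_sub_cancel] at ih ⊢
    rw [List.range_succ_eq_map, List.map_cons, List.map_map]
    show _ = (a + b) :: nextItem (b :: t)
    rw [← ih]
    simp [List.getD_cons_succ]

-- ===== VERDICT (by name: the statement is the Claim_ definition above) =====
theorem nextItem_spec : Claim_equal_nextItem := by
  intro i _ _
  unfold Spec_nextItem
  rw [nextItem_alt_eq_map, map_adj_eq_nextItem]
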